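-- pv_equiv track=rewrite | github.com/mementum/codeeval | 01-easy/0232-not-so-clever/0232-not-so-clever.py | stupid_sort
-- ===== SOURCE A (Python) =====
-- def stupid_sort(tosort, iterations):
--
--     while(iterations):
--         iterations -= 1
--
--         dirty = False
--         for i in range(len(tosort) - 1):
--             a, b = tosort[i: i + 2]
--             if b < a:
--                 tosort[i], tosort[i + 1] = b, a
--                 dirty = True
--                 break
--
--         if not dirty:
--             break
--
--     return tosort
-- ===== SOURCE B (Python) =====
-- def stupid_sort(tosort, iterations):
--     # Gnome-sort style single back-stepping pointer: does the same swap sequence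
--     # as repeated first-inversion scans, but in O(n + swaps) instead of rescanning
--     # from index 0 each pass.  Mutates tosort in place (like the original) and
--     # returns it.
--     left = []              # sorted prefix already walked past
--     rest = tosort[::-1]    # remaining elements, reversed so rest[-1] is the front
--     while iterations != 0 and len(rest) >= 2:
--         a, b = rest[-1], rest[-2]
--         if a <= b:
--             left.append(rest.pop())
--         else:
--             rest[-1], rest[-2] = b, a
--             if left:
--                 rest.append(left.pop())
--             iterations -= 1
--     left.extend(reversed(rest))
--     tosort[:] = left
--     return tosort
-- ===== Notes on version B (the rewrite author's own statement) =====
-- stated objective: faster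
-- what changed: Replaces A's repeated full rescans from index 0 (one first-inversion swap per pass) with a single gnome-sort-style back-stepping pointer that performs the identical swap sequence in one walk.
import Mathlib
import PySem

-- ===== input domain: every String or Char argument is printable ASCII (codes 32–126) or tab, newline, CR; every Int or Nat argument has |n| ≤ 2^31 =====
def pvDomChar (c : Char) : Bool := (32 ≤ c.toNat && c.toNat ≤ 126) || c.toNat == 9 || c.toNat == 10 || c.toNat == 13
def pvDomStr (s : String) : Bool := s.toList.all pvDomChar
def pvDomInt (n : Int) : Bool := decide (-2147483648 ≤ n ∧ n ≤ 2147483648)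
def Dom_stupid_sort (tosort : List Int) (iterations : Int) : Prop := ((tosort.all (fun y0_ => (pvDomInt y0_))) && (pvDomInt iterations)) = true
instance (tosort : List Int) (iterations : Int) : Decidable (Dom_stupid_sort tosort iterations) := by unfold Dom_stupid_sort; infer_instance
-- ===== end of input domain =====

-- B replaces A's per-pass rescan-from-index-0 by one back-stepping pointer producing the
-- same swap sequence; the equivalence proved is about the return value (both Pythons also
-- mutate the argument list to the same final state).

-- ===== PORT A =====
-- inversion count: termination measure for the while-loops (not part of either algorithm's data)
def invCount : List Int → Nat
  | [] => 0
  | x :: xs => xs.countP (fun y => decide (y < x)) + invCount xs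

-- the inner for-loop of A: scan for the first adjacent inversion, swap it ("dirty"), else none
def passA : List Int → Option (List Int)
  | a :: b :: rest => if b < a then some (b :: a :: rest) else (passA (b :: rest)).map (fun t => a :: t)
  | _ => none

lemma invCount_swap (p : List Int) (a b : Int) (r : List Int) (h : b < a) :
    invCount (p ++ b :: a :: r) < invCount (p ++ a :: b :: r) := by
  induction p with
  | nil => simp [invCount, h, not_lt.2 h.le]; omega
  | cons x p ih =>
    simp only [List.cons_append, invCount]
    have hc : (p ++ b :: a :: r).countP (fun y => decide (y < x))
        = (p ++ a :: b :: r).countP (fun y => decide (y < x)) := by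
      simp [List.countP_append, List.countP_cons]; omega
    omega

lemma passA_short (l : List Int) (h2 : ∀ (a b : Int) (rest : List Int), l = a :: b :: rest → False) :
    passA l = none := by
  cases l with
  | nil => simp [passA]
  | cons x xs => cases xs with
    | nil => simp [passA]
    | cons y ys => exact absurd rfl (h2 x y ys)

lemma passA_perm (l t : List Int) (h : passA l = some t) : t.Perm l := by
  induction l using passA.induct generalizing t with
  | case1 a b rest hba =>
    simp [passA, hba] at h; subst h; exact List.Perm.swap a b rest
  | case2 a b rest hba ih =>
    simp [passA, hba] at h
    obtain ⟨t', ht', rfl⟩ := h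
    exact (ih t' ht').cons a
  | case3 l h2 => rw [passA_short l h2] at h; cases h

lemma passA_some_inv (l t : List Int) (h : passA l = some t) : invCount t < invCount l := by
  induction l using passA.induct generalizing t with
  | case1 a b rest hba =>
    simp [passA, hba] at h; subst h
    exact invCount_swap [] a b rest hba
  | case2 a b rest hba ih =>
    simp [passA, hba] at h
    obtain ⟨t', ht', rfl⟩ := h
    have hcount : t'.countP (fun y => decide (y < a)) = (b :: rest).countP (fun y => decide (y < a)) :=
      (passA_perm _ _ ht').countP_eq _
    have := ih t' ht'
    simp only [invCount] at *
    omega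
  | case3 l h2 => rw [passA_short l h2] at h; cases h

-- the outer while-loop of A: consume one iteration, run a pass, stop when not dirty
def loopA (tosort : List Int) (iterations : Int) : List Int :=
  if iterations = 0 then tosort
  else match h : passA tosort with
    | none => tosort
    | some t => loopA t (iterations - 1)
termination_by invCount tosort
decreasing_by exact passA_some_inv _ _ h

def stupid_sort (tosort : List Int) (iterations : Int) : List Int := loopA tosort iterations

-- ===== PORT B =====
-- the while-loop of B: `left` is the reversed walked-past prefix, `rest` the remaining suffix
def loopB (left rest : List Int) (iterations : Int) : List Int :=
  if iterations = 0 then left.reverse ++ rest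
  else match rest with
    | a :: b :: r =>
        if a ≤ b then loopB (a :: left) (b :: r) iterations
        else match left with
          | [] => loopB [] (b :: a :: r) (iterations - 1)
          | c :: left' => loopB left' (c :: b :: a :: r) (iterations - 1)
    | _ => left.reverse ++ rest
termination_by 2 * invCount (left.reverse ++ rest) + rest.length
decreasing_by
  · simp only [List.reverse_cons, List.append_assoc, List.cons_append, List.nil_append,
      List.length_cons]
    omega
  · have := invCount_swap [] a b r (by omega)
    simp only [List.reverse_nil, List.nil_append, List.length_cons] at *
    omega
  · have := invCount_swap (left'.reverse ++ [c]) a b r (by omega)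
    simp only [List.reverse_cons, List.append_assoc, List.cons_append, List.nil_append,
      List.length_cons] at *
    omega

def stupid_sort_alt (tosort : List Int) (iterations : Int) : List Int := loopB [] tosort iterations

-- ===== PRECONDITION & SPEC =====
def Spec_stupid_sort (tosort : List Int) (iterations : Int) (out : List Int) : Prop := out = stupid_sort_alt tosort iterations
instance (tosort : List Int) (iterations : Int) (out : List Int) : Decidable (Spec_stupid_sort tosort iterations out) := by unfold Spec_stupid_sort; infer_instance

-- ===== CLAIM (what is proved, stated in full; the proofs are below) =====
def Claim_equal_stupid_sort : Prop := ∀ (tosort : List Int) (iterations : Int), Dom_stupid_sort tosort iterations → Spec_stupid_sort tosort iterations (stupid_sort tosort iterations)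

-- ===== LEMMAS AND PROOFS =====

lemma loopA_zero (l : List Int) : loopA l 0 = l := by rw [loopA]; simp

lemma loopA_none {l : List Int} {k : Int} (hk : k ≠ 0) (h : passA l = none) : loopA l k = l := by
  rw [loopA, if_neg hk]
  split
  · rfl
  · rename_i t h'; rw [h'] at h; cases h

lemma loopA_some {l t : List Int} {k : Int} (hk : k ≠ 0) (h : passA l = some t) :
    loopA l k = loopA t (k - 1) := by
  rw [loopA, if_neg hk]
  split
  · rename_i h'; rw [h'] at h; cases h
  · rename_i t' h'; rw [h'] at h; cases h; rfl

lemma sorted_passA_none (l : List Int) (h : List.IsChain (· ≤ ·) l) : passA l = none := by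
  induction l using passA.induct with
  | case1 a b rest hba =>
    have := (List.isChain_cons.1 h).1 b rfl
    omega
  | case2 a b rest hba ih =>
    simp [passA, hba, ih (List.isChain_cons.1 h).2]
  | case3 l h2 => exact passA_short l h2

lemma passA_sorted_prefix (p : List Int) (a b : Int) (r : List Int)
    (hc : List.IsChain (· ≤ ·) (p ++ [a])) (h : b < a) :
    passA (p ++ a :: b :: r) = some (p ++ b :: a :: r) := by
  induction p with
  | nil => simp [passA, h]
  | cons x p ih =>
    have hc' : List.IsChain (· ≤ ·) (p ++ [a]) := (List.isChain_cons.1 hc).2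
    have hx : ∀ y ∈ (p ++ [a]).head?, x ≤ y := (List.isChain_cons.1 hc).1
    cases p with
    | nil =>
      have hxa : x ≤ a := hx a rfl
      simp [passA, not_lt.2 hxa, h]
    | cons y p' =>
      have hxy : x ≤ y := hx y rfl
      have hrec := ih hc'
      simp only [List.cons_append] at hrec
      simp [passA, not_lt.2 hxy, hrec]

lemma loop_eq (n : Nat) : ∀ (left rest : List Int) (k : Int),
    2 * invCount (left.reverse ++ rest) + rest.length ≤ n →
    List.IsChain (· ≤ ·) (left.reverse ++ rest.take 1) →
    loopA (left.reverse ++ rest) k = loopB left rest k := by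
  induction n with
  | zero =>
    intro left rest k hm hinv
    match rest with
    | [] =>
      have hs : passA (left.reverse ++ []) = none :=
        sorted_passA_none _ (by simpa using hinv)
      by_cases hk : k = 0
      · subst hk; rw [loopA_zero, loopB.eq_def]; simp
      · rw [loopA_none hk hs, loopB.eq_def]; simp [hk]
    | _ :: _ => simp only [List.length_cons] at hm; omega
  | succ n ih =>
    intro left rest k hm hinv
    by_cases hk : k = 0
    · subst hk; rw [loopA_zero, loopB.eq_def]; simp
    · match rest with
      | [] =>
        have hs : passA (left.reverse ++ []) = none :=
          sorted_passA_none _ (by simpa using hinv)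
        rw [loopA_none hk hs, loopB.eq_def]; simp [hk]
      | [x] =>
        have hs : passA (left.reverse ++ [x]) = none :=
          sorted_passA_none _ (by simpa using hinv)
        rw [loopA_none hk hs, loopB.eq_def]; simp [hk]
      | a :: b :: r =>
        simp only [List.take_succ_cons, List.take_zero] at hinv
        by_cases hab : a ≤ b
        · -- advance: same full list, one element moves from rest to left
          have hfull : (a :: left).reverse ++ (b :: r) = left.reverse ++ (a :: b :: r) := by
            simp
          have hdec := List.isChain_append.1 hinv
          have hinv' : List.IsChain (· ≤ ·) ((a :: left).reverse ++ (b :: r).take 1) := by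
            simp only [List.reverse_cons, List.take_succ_cons, List.take_zero, List.append_assoc]
            refine List.isChain_append.2 ⟨hdec.1, ?_, ?_⟩
            · simp [List.isChain_cons, hab]
            · intro x hx y hy
              simp only [List.cons_append, List.head?_cons, Option.mem_some_iff] at hy
              subst hy
              exact hdec.2.2 x hx a (by simp)
          have hm' : 2 * invCount ((a :: left).reverse ++ (b :: r)) + (b :: r).length ≤ n := by
            rw [hfull]; simp only [List.length_cons] at hm ⊢; omega
          have heq := ih (a :: left) (b :: r) k hm' hinv'
          rw [hfull] at heq
          rw [loopB.eq_def]
          simp only [if_neg hk, if_pos hab]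
          exact heq
        · -- swap: A rescans from 0 and swaps at the boundary; B swaps and steps back once
          have hba : b < a := lt_of_not_ge hab
          have hpass : passA (left.reverse ++ a :: b :: r) = some (left.reverse ++ b :: a :: r) :=
            passA_sorted_prefix _ _ _ _ hinv hba
          have hinvlt : invCount (left.reverse ++ b :: a :: r) < invCount (left.reverse ++ a :: b :: r) :=
            invCount_swap _ a b r hba
          rw [loopA_some hk hpass]
          match left with
          | [] =>
            have hm' : 2 * invCount (([] : List Int).reverse ++ (b :: a :: r)) + (b :: a :: r).length ≤ n := by
              simp only [List.reverse_nil, List.nil_append, List.length_cons] at hm hinvlt ⊢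
              omega
            have hinv' : List.IsChain (· ≤ ·) (([] : List Int).reverse ++ (b :: a :: r).take 1) := by
              simp
            have heq := ih [] (b :: a :: r) (k - 1) hm' hinv'
            simp only [List.reverse_nil, List.nil_append] at heq ⊢
            rw [loopB.eq_def]
            simp only [if_neg hk, if_neg hab]
            exact heq
          | c :: left' =>
            have hfull : left'.reverse ++ (c :: b :: a :: r) = (c :: left').reverse ++ (b :: a :: r) := by
              simp
            have hm' : 2 * invCount (left'.reverse ++ (c :: b :: a :: r)) + (c :: b :: a :: r).length ≤ n := by
              rw [hfull]
              simp only [List.length_cons] at hm hinvlt ⊢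
              omega
            have hinv' : List.IsChain (· ≤ ·) (left'.reverse ++ (c :: b :: a :: r).take 1) := by
              simp only [List.take_succ_cons, List.take_zero]
              have hbig : List.IsChain (· ≤ ·) ((left'.reverse ++ [c]) ++ [a]) := by
                simpa using hinv
              exact (List.isChain_append.1 hbig).1
            have heq := ih left' (c :: b :: a :: r) (k - 1) hm' hinv'
            rw [hfull] at heq
            rw [loopB.eq_def]
            simp only [if_neg hk, if_neg hab]
            exact heq

-- ===== VERDICT (by name: the statement is the Claim_ definition above) =====
theorem stupid_sort_spec : Claim_equal_stupid_sort := by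
  intro tosort iterations _
  unfold Spec_stupid_sort stupid_sort stupid_sort_alt
  have hinv : List.IsChain (· ≤ ·) (([] : List Int).reverse ++ tosort.take 1) := by
    cases tosort <;> simp
  have heq := loop_eq (2 * invCount tosort + tosort.length) [] tosort iterations (by simp) hinv
  simpa using heq
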